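-- pv_equiv track=rewrite | github.com/anthonynagle1/livite-sports-outreach | tools/backfill_contacts.py | pick_best_contact
-- ===== SOURCE A (Python) =====
-- TITLE_PRIORITY = [
--     ('director of operations', 1),
--     ('dir. of ops', 1),
--     ('operations', 1),
--     ('assistant coach', 2),
--     ('associate head coach', 2),
--     ('first assistant', 2),
--     ('head coach', 3),
-- ]
--
-- def pick_best_contact(staff_list):
--     """Pick the best contact from a staff list using priority logic."""
--     best = None
--     best_priority = 99
--
--     for person in staff_list:
--         email = person.get('email', '')
--         if not email or email == 'Not Found':
--             continue
--
--         title = (person.get('title', '') or '').lower()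
--         priority = 4  # Default
--
--         for pattern, prio in TITLE_PRIORITY:
--             if pattern in title:
--                 priority = prio
--                 break
--
--         if priority < best_priority:
--             best = person
--             best_priority = priority
--
--     # Fallback: any person with an email
--     if not best:
--         for person in staff_list:
--             email = person.get('email', '')
--             if email and email != 'Not Found':
--                 return person
--
--     return best
-- ===== SOURCE B (Python) =====
-- TITLE_PRIORITY = [
--     ('director of operations', 1),
--     ('dir. of ops', 1),
--     ('operations', 1),
--     ('assistant coach', 2),
--     ('associate head coach', 2),
--     ('first assistant', 2),
--     ('head coach', 3),
-- ]
--
-- def _prio(person):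
--     title = (person.get('title', '') or '').lower()
--     for pattern, prio in TITLE_PRIORITY:
--         if pattern in title:
--             return prio
--     return 4
--
-- def pick_best_contact(staff_list):
--     """Pick the best contact from a staff list using priority logic."""
--     candidates = [p for p in staff_list
--                   if p.get('email', '') and p.get('email', '') != 'Not Found']
--     if not candidates:
--         return None
--     return sorted(candidates, key=_prio)[0]
-- ===== Notes on version B (the rewrite author's own statement) =====
-- stated objective: simpler
-- what changed: B filters the staff with a valid email into a candidate list and returns the head of a stable sort by title priority (prio extracted into a helper), instead of A's single-pass scan tracking a running minimum plus a dead fallback loop.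
import Mathlib
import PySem

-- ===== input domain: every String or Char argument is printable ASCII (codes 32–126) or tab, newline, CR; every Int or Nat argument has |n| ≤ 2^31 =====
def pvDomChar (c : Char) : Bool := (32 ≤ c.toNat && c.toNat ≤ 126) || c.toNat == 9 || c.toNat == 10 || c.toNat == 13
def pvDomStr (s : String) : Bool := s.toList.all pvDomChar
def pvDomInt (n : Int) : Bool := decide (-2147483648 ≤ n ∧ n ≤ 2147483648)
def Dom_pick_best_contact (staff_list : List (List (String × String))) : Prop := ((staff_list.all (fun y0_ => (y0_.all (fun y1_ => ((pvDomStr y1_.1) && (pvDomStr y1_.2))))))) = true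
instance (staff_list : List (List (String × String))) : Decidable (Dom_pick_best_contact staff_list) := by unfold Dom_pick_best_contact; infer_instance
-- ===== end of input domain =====

-- B replaces A's running-minimum scan (with its dead fallback loop) by filter + stable sort by priority + head; objective: simpler.

def TITLE_PRIORITY : List (String × Int) :=
  [("director of operations", 1), ("dir. of ops", 1), ("operations", 1),
   ("assistant coach", 2), ("associate head coach", 2), ("first assistant", 2),
   ("head coach", 3)]

-- ===== PORT A =====
-- inner loop 'for pattern, prio in TITLE_PRIORITY: if pattern in title: priority = prio; break'
def pickPrioA : List (String × Int) → String → Int → Int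
  | [], _, priority => priority
  | (pattern, prio) :: rest, title, priority =>
      if PySem.Str.isIn pattern title then prio else pickPrioA rest title priority

-- the main 'for person in staff_list' loop over the state (best, best_priority)
def loopA : List (List (String × String)) → Option (List (String × String)) × Int →
    Option (List (String × String)) × Int
  | [], s => s
  | person :: rest, s =>
      let email := PySem.Dict.getD (PySem.Dict.mk person) "email" ""
      if email = "" ∨ email = "Not Found" then loopA rest s
      else
        -- "(person.get('title','') or '')": the 'or' is the identity here (the only falsy string is '')
        let title := PySem.Str.lower (PySem.Dict.getD (PySem.Dict.mk person) "title" "")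
        let priority := pickPrioA TITLE_PRIORITY title 4
        loopA rest (if priority < s.2 then (some person, priority) else s)

-- the fallback 'for person in staff_list: … return person' loop, falling through to 'return best'
def fallbackA : List (List (String × String)) → Option (List (String × String)) →
    Option (List (String × String))
  | [], best => best
  | person :: rest, best =>
      let email := PySem.Dict.getD (PySem.Dict.mk person) "email" ""
      if email ≠ "" ∧ email ≠ "Not Found" then some person else fallbackA rest best

def pick_best_contact (staff_list : List (List (String × String))) :
    Option (List (String × String)) :=
  let s := loopA staff_list (none, 99)
  -- 'if not best': true for None and for an empty (falsy) dict
  match s.1 with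
  | none => fallbackA staff_list none
  | some p => if p = [] then fallbackA staff_list (some p) else some p

-- ===== PORT B =====
-- the candidate condition "p.get('email','') and p.get('email','') != 'Not Found'"
def pvValid (p : List (String × String)) : Bool :=
  let e := PySem.Dict.getD (PySem.Dict.mk p) "email" ""
  !(e == "") && !(e == "Not Found")

-- helper _prio: first matching TITLE_PRIORITY entry, else 4
def prioAlt (person : List (String × String)) : Int :=
  let title := PySem.Str.lower (PySem.Dict.getD (PySem.Dict.mk person) "title" "")
  match TITLE_PRIORITY.find? (fun pr => PySem.Str.isIn pr.1 title) with
  | some pr => pr.2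
  | none => 4

def pick_best_contact_alt (staff_list : List (List (String × String))) :
    Option (List (String × String)) :=
  let candidates := staff_list.filter pvValid
  if candidates.isEmpty then none
  else (PySem.List.sorted candidates prioAlt).head?

-- ===== PRECONDITION & SPEC =====
def Spec_pick_best_contact (staff_list : List (List (String × String))) (out : Option (List (String × String))) : Prop := out = pick_best_contact_alt staff_list
instance (staff_list : List (List (String × String))) (out : Option (List (String × String))) : Decidable (Spec_pick_best_contact staff_list out) := by unfold Spec_pick_best_contact; infer_instance

-- ===== CLAIM (what is proved, stated in full; the proofs are below) =====
def Claim_equal_pick_best_contact : Prop := ∀ (staff_list : List (List (String × String))), Dom_pick_best_contact staff_list → Spec_pick_best_contact staff_list (pick_best_contact staff_list)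

-- ===== LEMMAS AND PROOFS =====

-- A's running minimum over a candidate list, as a pure scan (strict '<': ties keep the earlier one)
def pvGo : List (List (String × String)) → List (String × String) → List (String × String)
  | [], b => b
  | x :: xs, b => pvGo xs (if prioAlt x < prioAlt b then x else b)

theorem pvValid_iff (p : List (String × String)) :
    pvValid p = true ↔ PySem.Dict.getD (PySem.Dict.mk p) "email" "" ≠ "" ∧ PySem.Dict.getD (PySem.Dict.mk p) "email" "" ≠ "Not Found" := by
  simp [pvValid]

theorem pickPrioA_eq_find (l : List (String × Int)) (t : String) :
    pickPrioA l t 4 =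
      (match l.find? (fun pr => PySem.Str.isIn pr.1 t) with
       | some pr => pr.2
       | none => 4) := by
  induction l with
  | nil => rfl
  | cons hd tl ih =>
      obtain ⟨pat, pr⟩ := hd
      cases h : PySem.Str.isIn pat t with
      | true => simp only [pickPrioA, List.find?, h, if_true]
      | false => simp only [pickPrioA, List.find?, h, Bool.false_eq_true, if_false]; exact ih

theorem pickPrioA_eq_prioAlt (p : List (String × String)) :
    pickPrioA TITLE_PRIORITY (PySem.Str.lower (PySem.Dict.getD (PySem.Dict.mk p) "title" "")) 4 = prioAlt p := by
  rw [pickPrioA_eq_find]; rfl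

theorem pickPrioA_lt_99 (l : List (String × Int)) (t : String) (d : Int)
    (hl : ∀ x ∈ l, x.2 < 99) (hd : d < 99) : pickPrioA l t d < 99 := by
  induction l with
  | nil => exact hd
  | cons hd' tl ih =>
      obtain ⟨pat, pr⟩ := hd'
      cases h : PySem.Str.isIn pat t with
      | true =>
          simp only [pickPrioA, h, if_true]
          exact hl (pat, pr) (by simp)
      | false =>
          simp only [pickPrioA, h, Bool.false_eq_true, if_false]
          exact ih (fun x hx => hl x (by simp [hx]))

theorem prioAlt_lt_99 (p : List (String × String)) : prioAlt p < 99 := by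
  rw [← pickPrioA_eq_prioAlt]
  exact pickPrioA_lt_99 _ _ _ (by decide) (by norm_num)

theorem loopA_filter (l : List (List (String × String)))
    (s : Option (List (String × String)) × Int) :
    loopA l s = loopA (l.filter pvValid) s := by
  induction l generalizing s with
  | nil => rfl
  | cons p rest ih =>
      by_cases hv : pvValid p = true
      · have hg : ¬ (PySem.Dict.getD (PySem.Dict.mk p) "email" "" = "" ∨ PySem.Dict.getD (PySem.Dict.mk p) "email" "" = "Not Found") := by
          rcases (pvValid_iff p).1 hv with ⟨h1, h2⟩
          rintro (h | h) <;> [exact h1 h; exact h2 h]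
        simp only [loopA, List.filter_cons, hv, if_true, if_neg hg]
        exact ih _
      · have hg : PySem.Dict.getD (PySem.Dict.mk p) "email" "" = "" ∨ PySem.Dict.getD (PySem.Dict.mk p) "email" "" = "Not Found" := by
          by_contra hc
          exact hv ((pvValid_iff p).2 ⟨fun h => hc (Or.inl h), fun h => hc (Or.inr h)⟩)
        have hv' : pvValid p = false := by simpa using hv
        simp only [loopA, List.filter_cons, hv', Bool.false_eq_true, if_false, if_pos hg]
        exact ih s

theorem loopA_cands (cs : List (List (String × String))) (b : List (String × String))
    (h : ∀ x ∈ cs, pvValid x = true) :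
    loopA cs (some b, prioAlt b) = (some (pvGo cs b), prioAlt (pvGo cs b)) := by
  induction cs generalizing b with
  | nil => simp [loopA, pvGo]
  | cons x xs ih =>
      have hx : pvValid x = true := h x (by simp)
      have hg : ¬ (PySem.Dict.getD (PySem.Dict.mk x) "email" "" = "" ∨ PySem.Dict.getD (PySem.Dict.mk x) "email" "" = "Not Found") := by
        rcases (pvValid_iff x).1 hx with ⟨h1, h2⟩
        rintro (hh | hh) <;> [exact h1 hh; exact h2 hh]
      have hrest : ∀ y ∈ xs, pvValid y = true := fun y hy => h y (by simp [hy])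
      simp only [loopA, if_neg hg, pickPrioA_eq_prioAlt, pvGo]
      by_cases hlt : prioAlt x < prioAlt b
      · rw [if_pos hlt, if_pos hlt]; exact ih x hrest
      · rw [if_neg hlt, if_neg hlt]; exact ih b hrest

theorem head_foldl_insertBy (xs : List (List (String × String)))
    (b : List (String × String)) (t : List (List (String × String))) :
    (xs.foldl (fun acc x =>
        PySem.List.insertBy (fun a c => decide (prioAlt a < prioAlt c)) x acc) (b :: t)).head? =
      some (pvGo xs b) := by
  induction xs generalizing b t with
  | nil => rfl
  | cons x xs ih =>
      simp only [List.foldl, PySem.List.insertBy, pvGo]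
      by_cases hlt : prioAlt x < prioAlt b
      · simp only [hlt, decide_true, if_pos]
        exact ih x (b :: t)
      · simp only [hlt, decide_false, Bool.false_eq_true, if_false]
        exact ih b _

theorem pvGo_mem (xs : List (List (String × String))) (b : List (String × String)) :
    pvGo xs b = b ∨ pvGo xs b ∈ xs := by
  induction xs generalizing b with
  | nil => exact Or.inl rfl
  | cons x xs ih =>
      simp only [pvGo]
      by_cases hlt : prioAlt x < prioAlt b
      · rw [if_pos hlt]
        rcases ih x with h | h
        · exact Or.inr (by simp [h])
        · exact Or.inr (by simp [h])
      · rw [if_neg hlt]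
        rcases ih b with h | h
        · exact Or.inl h
        · exact Or.inr (by simp [h])

theorem pvValid_ne_nil (p : List (String × String)) (h : pvValid p = true) : p ≠ [] := by
  rintro rfl
  exact absurd h (by decide)

theorem fallbackA_none (l : List (List (String × String)))
    (h : ∀ x ∈ l, pvValid x = false) : fallbackA l none = none := by
  induction l with
  | nil => simp [fallbackA]
  | cons p rest ih =>
      have hp : pvValid p = false := h p (by simp)
      have hg : ¬ (PySem.Dict.getD (PySem.Dict.mk p) "email" "" ≠ "" ∧ PySem.Dict.getD (PySem.Dict.mk p) "email" "" ≠ "Not Found") := by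
        intro hc
        rw [(pvValid_iff p).2 hc] at hp
        exact Bool.true_eq_false.mp hp
      simp only [fallbackA, if_neg hg]
      exact ih (fun y hy => h y (by simp [hy]))

-- ===== VERDICT (by name: the statement is the Claim_ definition above) =====
theorem pick_best_contact_spec : Claim_equal_pick_best_contact := by
  intro staff_list _hdom
  unfold Spec_pick_best_contact pick_best_contact pick_best_contact_alt
  rw [loopA_filter]
  cases hc : staff_list.filter pvValid with
  | nil =>
      have hnone : ∀ x ∈ staff_list, pvValid x = false := by
        intro x hx
        have := (List.filter_eq_nil_iff.mp hc) x hx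
        simpa using this
      simp only [loopA, List.isEmpty_nil, if_true]
      exact fallbackA_none staff_list hnone
  | cons c cs =>
      have hall : ∀ x ∈ c :: cs, pvValid x = true := by
        intro x hx
        rw [← hc] at hx
        exact List.of_mem_filter hx
      have hcv : pvValid c = true := hall c (by simp)
      have hg : ¬ (PySem.Dict.getD (PySem.Dict.mk c) "email" "" = "" ∨ PySem.Dict.getD (PySem.Dict.mk c) "email" "" = "Not Found") := by
        rcases (pvValid_iff c).1 hcv with ⟨h1, h2⟩
        rintro (hh | hh) <;> [exact h1 hh; exact h2 hh]
      have h99 : prioAlt c < 99 := prioAlt_lt_99 c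
      have hrest : ∀ y ∈ cs, pvValid y = true := fun y hy => hall y (by simp [hy])
      -- A's loop on the candidates
      have hA : loopA (c :: cs) (none, 99) = (some (pvGo cs c), prioAlt (pvGo cs c)) := by
        simp only [loopA, if_neg hg, pickPrioA_eq_prioAlt, if_pos h99]
        exact loopA_cands cs c hrest
      -- the selected person is a valid candidate, hence a non-empty dict
      have hne : pvGo cs c ≠ [] := by
        rcases pvGo_mem cs c with h | h
        · rw [h]; exact pvValid_ne_nil c hcv
        · exact pvValid_ne_nil _ (hrest _ h)
      -- B's sorted head
      have hB : (PySem.List.sorted (c :: cs) prioAlt).head? = some (pvGo cs c) := by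
        rw [PySem.List.sorted_eq_foldl_insertBy]
        simp only [List.foldl, PySem.List.insertBy]
        exact head_foldl_insertBy cs c []
      simp only [hA, List.isEmpty_cons, if_false, hB, Bool.false_eq_true, if_neg hne]
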